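-- pv_equiv track=rewrite | github.com/jameschoi112/weverse_signup_automation | src/services/email_generator.py | _pattern_back_heavy
-- ===== SOURCE A (Python) =====
-- from typing import Set, List
--
-- def _pattern_back_heavy(chars: List[str]) -> str:
--     """뒤쪽에 많은 dot"""
--     result = [chars[0]]
--     middle = len(chars) // 2
--     for i in range(1, len(chars)):
--         if i > middle:
--             result.append('.')
--         result.append(chars[i])
--     return ''.join(result)
-- ===== SOURCE B (Python) =====
-- from typing import Set, List
--
-- def _pattern_back_heavy(chars: List[str]) -> str:
--     middle = len(chars) // 2
--     return chars[0] + ''.join(chars[1:middle + 1]) + ''.join('.' + c for c in chars[middle + 1:])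
-- ===== Notes on version B (the rewrite author's own statement) =====
-- stated objective: simpler
-- what changed: Replaces the single indexed loop with a per-iteration conditional dot-branch by a slice decomposition: chars[0], then the front half chars[1:middle+1] joined as-is, then the back half chars[middle+1:] with each element dot-prefixed.
import Mathlib
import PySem

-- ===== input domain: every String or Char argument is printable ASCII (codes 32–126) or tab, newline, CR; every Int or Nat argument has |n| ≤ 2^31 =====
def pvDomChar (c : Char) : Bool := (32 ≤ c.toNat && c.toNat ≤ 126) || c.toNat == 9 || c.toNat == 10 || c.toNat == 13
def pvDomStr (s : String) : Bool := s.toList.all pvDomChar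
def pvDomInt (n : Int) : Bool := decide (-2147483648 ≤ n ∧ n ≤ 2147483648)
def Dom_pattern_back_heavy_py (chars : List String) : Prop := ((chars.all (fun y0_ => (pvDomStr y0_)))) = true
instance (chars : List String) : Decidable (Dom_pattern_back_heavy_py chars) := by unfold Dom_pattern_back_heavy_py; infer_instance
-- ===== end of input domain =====

-- B replaces A's per-index loop with its conditional dot-branch by a slice decomposition:
-- the front half chars[1:middle+1] is joined as-is, the back half chars[middle+1:] is dot-prefixed (objective: simpler).

-- ===== PORT A =====
def pattern_back_heavy_py (chars : List String) : String :=
  let result : List String := [PySem.List.pyGetD chars 0 ""]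
  let middle : Int := PySem.Int.floordiv (chars.length : Int) 2
  let result := (PySem.List.pyRange 1 (chars.length : Int) 1).foldl
    (fun acc i =>
      let acc := if i > middle then acc ++ ["."] else acc
      acc ++ [PySem.List.pyGetD chars i ""]) result
  PySem.Str.join "" result

-- ===== PORT B =====
def pattern_back_heavy_py_alt (chars : List String) : String :=
  let middle : Int := PySem.Int.floordiv (chars.length : Int) 2
  PySem.List.pyGetD chars 0 "" ++
    PySem.Str.join "" (PySem.List.slice chars (some 1) (some (middle + 1))) ++
    PySem.Str.join "" ((PySem.List.slice chars (some (middle + 1)) none).map (fun c => "." ++ c))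

-- ===== PRECONDITION & SPEC =====
-- A raises IndexError on the empty list (chars[0]); B raises there too.
def Pre_pattern_back_heavy_py (chars : List String) : Prop := chars ≠ []
instance (chars : List String) : Decidable (Pre_pattern_back_heavy_py chars) := by unfold Pre_pattern_back_heavy_py; infer_instance
def pvWitness_pattern_back_heavy_py : List String := ["a", "b", "c"]

def Spec_pattern_back_heavy_py (chars : List String) (out : String) : Prop := out = pattern_back_heavy_py_alt chars
instance (chars : List String) (out : String) : Decidable (Spec_pattern_back_heavy_py chars out) := by unfold Spec_pattern_back_heavy_py; infer_instance

-- ===== CLAIM (what is proved, stated in full; the proofs are below) =====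
def Claim_equal_pattern_back_heavy_py : Prop := ∀ (chars : List String), Dom_pattern_back_heavy_py chars → Pre_pattern_back_heavy_py chars → Spec_pattern_back_heavy_py chars (pattern_back_heavy_py chars)

-- ===== LEMMAS AND PROOFS =====

-- ''.join over List Char: with the empty separator, intercalate is flatten.
theorem join_nil_sep (ps : List (List Char)) : PySem.Chars.join [] ps = ps.flatten := by
  unfold PySem.Chars.join List.intercalate
  induction ps with
  | nil => rfl
  | cons p rest ih =>
    cases rest with
    | nil => rfl
    | cons q r => simp_all [List.intersperse]

theorem toList_join_empty (l : List String) :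
    (PySem.Str.join "" l).toList = (l.map String.toList).flatten := by
  simp [PySem.Str.join, join_nil_sep]

-- A's loop output (as a list of pieces), indexed: plain pieces below m, dot-prefixed from m on.
theorem loop_pieces (xs : List String) (m : Nat) :
    (List.range xs.length).flatMap
      (fun k => if m ≤ k then [".", xs.getD k ""] else [xs.getD k ""])
    = xs.take m ++ (xs.drop m).flatMap (fun c => [".", c]) := by
  induction xs generalizing m with
  | nil => simp
  | cons y ys ih =>
    rw [List.length_cons, List.range_succ_eq_map, List.flatMap_cons, List.flatMap_map]
    have hfun : (fun (k : Nat) => if m ≤ k + 1 then [".", (y :: ys).getD (k + 1) ""]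
          else [(y :: ys).getD (k + 1) ""])
        = (fun (k : Nat) => if m - 1 ≤ k then [".", ys.getD k ""] else [ys.getD k ""]) := by
      funext k
      have hiff : (m ≤ k + 1) ↔ (m - 1 ≤ k) := by omega
      rw [if_congr hiff rfl rfl]
      simp
    rw [hfun, ih (m - 1)]
    cases m with
    | zero => simp
    | succ m' => simp

-- dotting the pieces: flatMap [".", c] flattens to the same chars as mapping ("." ++ ·).
theorem dots_flatten (d : List String) :
    ((d.flatMap (fun c => [".", c])).map String.toList).flatten
      = ((d.map (fun c => "." ++ c)).map String.toList).flatten := by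
  induction d with
  | nil => rfl
  | cons c cs ih => simp [ih]

-- ===== VERDICT (by name: the statement is the Claim_ definition above) =====
theorem pattern_back_heavy_py_spec : Claim_equal_pattern_back_heavy_py := by
  intro chars _ hpre
  unfold Spec_pattern_back_heavy_py
  obtain ⟨c, rest, rfl⟩ : ∃ c rest, chars = c :: rest := by
    cases chars with
    | nil => exact absurd rfl hpre
    | cons c rest => exact ⟨c, rest, rfl⟩
  have hlen : ((c :: rest).length : Int) = ((rest.length + 1 : Nat) : Int) := by
    simp
  have hmid : PySem.Int.floordiv (((c :: rest).length : Nat) : Int) 2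
      = (((rest.length + 1) / 2 : Nat) : Int) := by
    rw [hlen]; exact_mod_cast PySem.Int.floordiv_natCast (rest.length + 1) 2
  have hc0 : PySem.List.pyGetD (c :: rest) 0 "" = c := PySem.List.pyGetD_zero_cons c rest ""
  -- abbreviation for the cut point
  have hA : (pattern_back_heavy_py (c :: rest)).toList
      = c.toList ++ ((rest.take ((rest.length + 1) / 2)
          ++ (rest.drop ((rest.length + 1) / 2)).flatMap (fun s => [".", s])).map
          String.toList).flatten := by
    simp only [pattern_back_heavy_py]
    rw [hmid]
    have hbody : (fun (acc : List String) (i : Int) =>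
          (if i > (((rest.length + 1) / 2 : Nat) : Int) then acc ++ ["."] else acc)
            ++ [PySem.List.pyGetD (c :: rest) i ""])
        = (fun acc i => acc ++ (if i > (((rest.length + 1) / 2 : Nat) : Int)
              then [".", PySem.List.pyGetD (c :: rest) i ""]
              else [PySem.List.pyGetD (c :: rest) i ""])) := by
      funext acc i
      split <;> simp
    rw [hbody, PySem.List.foldl_append_eq_flatMap]
    have hrange : PySem.List.pyRange 1 (((c :: rest).length : Nat) : Int) 1
        = (List.range rest.length).map (fun (k : Nat) => (1 : Int) + (k : Int)) := by
      rw [PySem.List.pyRange_one]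
      have : ((((c :: rest).length : Nat) : Int) - 1).toNat = rest.length := by
        rw [hlen]; omega
      rw [this]
    rw [hrange, List.flatMap_map]
    have hfun : (fun (k : Nat) => if (1 : Int) + (k : Int) > (((rest.length + 1) / 2 : Nat) : Int)
          then [".", PySem.List.pyGetD (c :: rest) ((1 : Int) + (k : Int)) ""]
          else [PySem.List.pyGetD (c :: rest) ((1 : Int) + (k : Int)) ""])
        = (fun k => if (rest.length + 1) / 2 ≤ k then [".", rest.getD k ""]
            else [rest.getD k ""]) := by
      funext k
      have hidx : PySem.List.pyGetD (c :: rest) ((1 : Int) + (k : Int)) "" = rest.getD k "" := by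
        have h1 : (1 : Int) + (k : Int) = ((k + 1 : Nat) : Int) := by push_cast; ring
        rw [h1, PySem.List.pyGetD_natCast]
        simp [List.getD]
      have hcond : ((1 : Int) + (k : Int) > (((rest.length + 1) / 2 : Nat) : Int))
          ↔ ((rest.length + 1) / 2 ≤ k) := by omega
      rw [hidx]
      by_cases h : (rest.length + 1) / 2 ≤ k
      · rw [if_pos (hcond.mpr h), if_pos h]
      · rw [if_neg (fun hh => h (hcond.mp hh)), if_neg h]
    rw [hfun, loop_pieces rest ((rest.length + 1) / 2), toList_join_empty, hc0]
    simp
  have hslice1 : PySem.List.slice (c :: rest) (some 1)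
      (some ((((rest.length + 1) / 2 : Nat) : Int) + 1)) = rest.take ((rest.length + 1) / 2) := by
    have h1 : (1 : Int) = ((1 : Nat) : Int) := by norm_num
    have h2 : ((((rest.length + 1) / 2 : Nat) : Int) + 1)
        = (((rest.length + 1) / 2 + 1 : Nat) : Int) := by push_cast; ring
    rw [h2, h1, PySem.List.slice_natCast]
    simp
  have hslice2 : PySem.List.slice (c :: rest)
      (some ((((rest.length + 1) / 2 : Nat) : Int) + 1)) none
      = rest.drop ((rest.length + 1) / 2) := by
    have h2 : ((((rest.length + 1) / 2 : Nat) : Int) + 1)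
        = (((rest.length + 1) / 2 + 1 : Nat) : Int) := by push_cast; ring
    rw [h2, PySem.List.slice_from_natCast]
    simp
  have hB : (pattern_back_heavy_py_alt (c :: rest)).toList
      = c.toList ++ ((rest.take ((rest.length + 1) / 2)).map String.toList).flatten
          ++ (((rest.drop ((rest.length + 1) / 2)).map (fun s => "." ++ s)).map
              String.toList).flatten := by
    simp only [pattern_back_heavy_py_alt]
    rw [hmid, hslice1, hslice2, hc0, String.toList_append, String.toList_append,
      toList_join_empty, toList_join_empty]
  apply String.toList_inj.mp
  rw [hA, hB, List.map_append, List.flatten_append, dots_flatten]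
  simp
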